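-- pv_equiv track=rewrite | github.com/hakloi/python_portfolio | sandbox/yandex/interview/ML_collections_of_cards.py | check_same_cards
-- ===== SOURCE A (Python) =====
-- def check_same_cards(arr):
--     dct = {}
--     min_diff = float('inf')
--     for i, el in enumerate(arr):
--         if el in dct:
--             diff = i - dct[el] - 1
--             min_diff = min(min_diff, diff)
--         dct[el] = i
--
--     if min_diff == float('inf'): return -1
--     else: return min_diff
-- ===== SOURCE B (Python) =====
-- def check_same_cards(arr):
--     positions = {}
--     for i, el in enumerate(arr):
--         positions.setdefault(el, []).append(i)
--     best = None
--     for pos in positions.values():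
--         for prev, cur in zip(pos, pos[1:]):
--             gap = cur - prev - 1
--             if best is None or gap < best:
--                 best = gap
--     return -1 if best is None else best
-- ===== Notes on version B (the rewrite author's own statement) =====
-- stated objective: alternative
-- what changed: Instead of a single on-the-fly pass keeping one last-seen index per value and a running minimum, B first builds a dict of full position lists per value, then does a second grouped pass over consecutive position pairs to take the minimum gap.
import Mathlib
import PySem

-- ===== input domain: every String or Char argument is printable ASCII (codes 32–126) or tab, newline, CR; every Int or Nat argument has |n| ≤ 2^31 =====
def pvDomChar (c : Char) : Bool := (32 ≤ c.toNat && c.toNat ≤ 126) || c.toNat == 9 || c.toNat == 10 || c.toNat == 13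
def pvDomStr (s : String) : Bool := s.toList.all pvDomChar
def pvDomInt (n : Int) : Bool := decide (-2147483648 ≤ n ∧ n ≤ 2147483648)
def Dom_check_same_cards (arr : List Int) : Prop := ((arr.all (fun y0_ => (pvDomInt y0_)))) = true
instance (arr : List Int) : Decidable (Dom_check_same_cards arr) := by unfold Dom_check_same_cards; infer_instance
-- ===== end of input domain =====

-- B replaces A's single last-seen-index pass by a two-phase version (build full position
-- lists per card value, then scan consecutive position pairs per group); alternative
-- decomposition, same cost, proved to return the same value on every input.

-- ===== PORT A =====
-- literal transliteration of A: one fold over enumerate(arr) carrying (dct, min_diff);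
-- min_diff : Option Int, none = float('inf')
def check_same_cards (arr : List Int) : Int :=
  let st := (PySem.List.enumerate arr).foldl
    (fun (st : PySem.Dict Int Int × Option Int) p =>
      let m' := match PySem.Dict.get? st.1 p.2 with
        | some last =>
            -- diff = i - dct[el] - 1; min_diff = min(min_diff, diff)
            some (match st.2 with
                  | none => p.1 - last - 1
                  | some mv => min mv (p.1 - last - 1))
        | none => st.2
      (PySem.Dict.insert st.1 p.2 p.1, m'))
    (PySem.Dict.empty, none)
  match st.2 with
  | none => -1
  | some m => m

-- ===== PORT B =====
-- literal transliteration of Source B: phase 1 builds positions[el] (setdefault+append =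
-- d[el] = d.get(el, []) + [i], i.e. Dict.modify); phase 2 folds over positions.values(),
-- zipping each position list with its tail; best : Option Int, none = Python None
def check_same_cards_alt (arr : List Int) : Int :=
  let positions := (PySem.List.enumerate arr).foldl
    (fun (d : PySem.Dict Int (List Int)) p =>
      PySem.Dict.modify d p.2 [] (fun l => l ++ [p.1]))
    PySem.Dict.empty
  let best := (PySem.Dict.values positions).foldl
    (fun (b : Option Int) pos =>
      (pos.zip pos.tail).foldl
        (fun (b : Option Int) q =>
          let gap := q.2 - q.1 - 1
          match b with
          | none => some gap
          | some m => if gap < m then some gap else some m)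
        b)
    none
  match best with
  | none => -1
  | some m => m

-- ===== PRECONDITION & SPEC =====
def Spec_check_same_cards (arr : List Int) (out : Int) : Prop := out = check_same_cards_alt arr
instance (arr : List Int) (out : Int) : Decidable (Spec_check_same_cards arr out) := by unfold Spec_check_same_cards; infer_instance

-- ===== CLAIM (what is proved, stated in full; the proofs are below) =====
def Claim_equal_check_same_cards : Prop := ∀ (arr : List Int), Dom_check_same_cards arr → Spec_check_same_cards arr (check_same_cards arr)

-- ===== LEMMAS AND PROOFS =====

-- the common "update the running minimum with gap g" step (B's branch shape)
def pvStep (b : Option Int) (g : Int) : Option Int :=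
  match b with
  | none => some g
  | some m => if g < m then some g else some m

-- A's seen-branch update is the same step
theorem pvStep_eq_min (b : Option Int) (g : Int) :
    (some (match b with | none => g | some mv => min mv g) : Option Int) = pvStep b g := by
  cases b with
  | none => rfl
  | some mv => simp only [pvStep]; split_ifs with h <;> simp [min_def] <;> omega

theorem pvStep_eq_some_min (b : Option Int) (g : Int) :
    pvStep b g = some (min g (b.getD g)) := by
  cases b with
  | none => simp [pvStep]
  | some m =>
    simp only [pvStep, Option.getD_some, min_def]
    split_ifs <;> simp <;> omega

theorem pvStep_comm (b : Option Int) (g h : Int) :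
    pvStep (pvStep b g) h = pvStep (pvStep b h) g := by
  cases b with
  | none => simp [pvStep_eq_some_min, min_comm]
  | some m => simp [pvStep_eq_some_min, min_left_comm]

theorem foldl_pvStep_step (l : List Int) (b : Option Int) (g : Int) :
    l.foldl pvStep (pvStep b g) = pvStep (l.foldl pvStep b) g := by
  induction l generalizing b with
  | nil => rfl
  | cons x t ih => simp only [List.foldl_cons, pvStep_comm b g x, ih]

theorem foldl_pvStep_middle (xs ys : List Int) (b : Option Int) (g : Int) :
    (xs ++ g :: ys).foldl pvStep b = pvStep ((xs ++ ys).foldl pvStep b) g := by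
  simp only [List.foldl_append, List.foldl_cons, foldl_pvStep_step]

-- occurrence indices of card x in an enumerated prefix
def pvOcc (l : List (Int × Int)) (x : Int) : List Int :=
  (l.filter (fun p => p.2 == x)).map (fun p => p.1)

-- gaps between consecutive occurrences of one card
def pvGaps (pos : List Int) : List Int :=
  (pos.zip pos.tail).map (fun q => q.2 - q.1 - 1)

def pvKeys (l : List (Int × Int)) : List Int := PySem.Set.ofList (l.map (fun p => p.2))

-- all gaps, grouped by card in first-occurrence order (B's traversal)
def pvAll (l : List (Int × Int)) : List Int :=
  (pvKeys l).flatMap (fun x => pvGaps (pvOcc l x))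

-- A's fold step
def pvStepA (st : PySem.Dict Int Int × Option Int) (p : Int × Int) :
    PySem.Dict Int Int × Option Int :=
  let m' := match PySem.Dict.get? st.1 p.2 with
    | some last => some (match st.2 with
                         | none => p.1 - last - 1
                         | some mv => min mv (p.1 - last - 1))
    | none => st.2
  (PySem.Dict.insert st.1 p.2 p.1, m')

theorem pvOcc_append (l : List (Int × Int)) (p : Int × Int) (x : Int) :
    pvOcc (l ++ [p]) x = pvOcc l x ++ (if p.2 = x then [p.1] else []) := by
  simp only [pvOcc, List.filter_append, List.map_append]
  by_cases h : p.2 = x <;> simp [h]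

theorem pvOcc_eq_nil_iff (l : List (Int × Int)) (x : Int) :
    pvOcc l x = [] ↔ x ∉ l.map (fun p => p.2) := by
  simp only [pvOcc, List.map_eq_nil_iff, List.filter_eq_nil_iff, List.mem_map]
  constructor
  · rintro h ⟨p, hp, rfl⟩; exact absurd (by simp) (h p hp)
  · intro h p hp
    simp only [beq_iff_eq]
    exact fun he => h ⟨p, hp, he⟩

theorem pvGaps_append (pos : List Int) (j i : Int) (h : pos.getLast? = some j) :
    pvGaps (pos ++ [i]) = pvGaps pos ++ [i - j - 1] := by
  induction pos generalizing j with
  | nil => simp at h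
  | cons a t ih =>
    cases t with
    | nil => simp at h; subst h; simp [pvGaps]
    | cons b t' =>
      have h' : (b :: t').getLast? = some j := by
        rw [List.getLast?_cons_cons] at h; exact h
      have := ih j h'
      simp only [pvGaps, List.cons_append, List.zip_cons_cons, List.tail_cons,
        List.map_cons] at this ⊢
      rw [List.cons.injEq]
      exact ⟨rfl, this⟩

-- main invariant: after folding an enumerated prefix l, A's dict holds the last
-- occurrence index of every card, and A's running minimum is the fold of pvStep
-- over all grouped gaps of l
theorem pvMain (l : List (Int × Int)) :
    (∀ x, PySem.Dict.get? (l.foldl pvStepA (PySem.Dict.empty, none)).1 x = (pvOcc l x).getLast?)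
    ∧ (l.foldl pvStepA (PySem.Dict.empty, none)).2 = (pvAll l).foldl pvStep none := by
  induction l using List.reverseRecOn with
  | nil =>
    refine ⟨fun x => ?_, ?_⟩
    · simp [pvOcc, PySem.Dict.get?_empty]
    · simp [pvAll, pvKeys, PySem.Set.ofList]
  | append_singleton l p ih =>
    obtain ⟨ih1, ih2⟩ := ih
    rw [List.foldl_append, List.foldl_cons, List.foldl_nil]
    set st := l.foldl pvStepA (PySem.Dict.empty, none) with hst
    constructor
    · intro x
      show (PySem.Dict.insert st.1 p.2 p.1).get? x = _
      rw [PySem.Dict.get?_insert, pvOcc_append]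
      by_cases hx : x = p.2
      · simp [hx]
      · have : ¬ p.2 = x := fun h => hx h.symm
        simp [hx, this, ih1 x]
    · show (match PySem.Dict.get? st.1 p.2 with
            | some last => some (match st.2 with
                                 | none => p.1 - last - 1
                                 | some mv => min mv (p.1 - last - 1))
            | none => st.2) = _
      rw [ih1 p.2]
      by_cases hmem : p.2 ∈ l.map (fun q => q.2)
      · -- seen card: one new gap appears inside its group
        have hocc : pvOcc l p.2 ≠ [] := fun h => (pvOcc_eq_nil_iff l p.2).mp h hmem
        obtain ⟨j, hj⟩ : ∃ j, (pvOcc l p.2).getLast? = some j := by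
          cases h : (pvOcc l p.2).getLast? with
          | none => exact absurd (List.getLast?_eq_none_iff.mp h) hocc
          | some j => exact ⟨j, rfl⟩
        rw [hj]
        have hkeys : pvKeys (l ++ [p]) = pvKeys l := by
          simp only [pvKeys, List.map_append, List.map_cons, List.map_nil,
            PySem.Set.ofList_append_singleton]
          exact PySem.Set.add_of_mem ((PySem.Set.mem_ofList _ _).mpr hmem)
        have hmemk : p.2 ∈ pvKeys l := (PySem.Set.mem_ofList _ _).mpr hmem
        obtain ⟨s, t, hsplit⟩ := List.append_of_mem hmemk
        have hnd : (s ++ p.2 :: t).Nodup := hsplit ▸ PySem.Set.nodup_ofList _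
        have hps : p.2 ∉ s := by
          rw [List.nodup_append] at hnd
          exact fun h => hnd.2.2 p.2 h p.2 (by simp) rfl
        have hpt : p.2 ∉ t := by
          rw [List.nodup_append] at hnd
          exact (List.nodup_cons.mp hnd.2.1).1
        have hcong : ∀ x' ∈ s, pvGaps (pvOcc (l ++ [p]) x') = pvGaps (pvOcc l x') := by
          intro x' hx'
          rw [pvOcc_append]
          have : ¬ p.2 = x' := fun h => hps (h ▸ hx')
          simp [this]
        have hcongt : ∀ x' ∈ t, pvGaps (pvOcc (l ++ [p]) x') = pvGaps (pvOcc l x') := by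
          intro x' hx'
          rw [pvOcc_append]
          have : ¬ p.2 = x' := fun h => hpt (h ▸ hx')
          simp [this]
        have hoccp : pvOcc (l ++ [p]) p.2 = pvOcc l p.2 ++ [p.1] := by
          rw [pvOcc_append]; simp
        have hAll' : pvAll (l ++ [p]) =
            (s.flatMap (fun x => pvGaps (pvOcc l x)) ++ pvGaps (pvOcc l p.2))
              ++ (p.1 - j - 1) :: t.flatMap (fun x => pvGaps (pvOcc l x)) := by
          rw [pvAll, hkeys, hsplit, List.flatMap_append,
            List.flatMap_congr hcong]
          simp only [List.flatMap_cons, List.flatMap_congr hcongt, hoccp,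
            pvGaps_append _ j p.1 hj]
          simp
        have hAll : pvAll l =
            (s.flatMap (fun x => pvGaps (pvOcc l x)) ++ pvGaps (pvOcc l p.2))
              ++ t.flatMap (fun x => pvGaps (pvOcc l x)) := by
          rw [pvAll, hsplit, List.flatMap_append]
          simp [List.flatMap_cons]
        rw [hAll', foldl_pvStep_middle, ← hAll, ← ih2]
        exact pvStep_eq_min st.2 (p.1 - j - 1)
      · -- new card: its group has one position, no new gap
        have hocc : pvOcc l p.2 = [] := (pvOcc_eq_nil_iff l p.2).mpr hmem
        rw [hocc]
        have hoccp : pvOcc (l ++ [p]) p.2 = [p.1] := by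
          rw [pvOcc_append, hocc]; simp
        have hcong : ∀ x' ∈ PySem.Set.ofList (l.map (fun q => q.2)),
            pvGaps (pvOcc (l ++ [p]) x') = pvGaps (pvOcc l x') := by
          intro x' hx'
          rw [pvOcc_append]
          have : ¬ p.2 = x' := fun h => hmem (h ▸ (PySem.Set.mem_ofList _ _).mp hx')
          simp [this]
        have hm : (l ++ [p]).map (fun q => (q : Int × Int).2)
            = l.map (fun q => q.2) ++ [p.2] := by simp
        have hAll : pvAll (l ++ [p]) = pvAll l := by
          rw [pvAll, pvAll, pvKeys, pvKeys, hm, PySem.Set.ofList_append_singleton,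
            PySem.Set.add_of_not_mem (fun h => hmem ((PySem.Set.mem_ofList _ _).mp h)),
            List.flatMap_append, List.flatMap_congr hcong]
          simp [hoccp, pvGaps]
        rw [hAll, ih2]
        simp

theorem pvAlt_eq (arr : List Int) :
    check_same_cards_alt arr =
      match (pvAll (PySem.List.enumerate arr)).foldl pvStep none with
      | none => -1
      | some m => m := by
  show (match (PySem.Dict.values ((PySem.List.enumerate arr).foldl
          (fun (d : PySem.Dict Int (List Int)) p =>
            PySem.Dict.modify d p.2 [] (fun s => s ++ [p.1])) PySem.Dict.empty)).foldl
        (fun (b : Option Int) pos =>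
          (pos.zip pos.tail).foldl
            (fun (b : Option Int) q =>
              let gap := q.2 - q.1 - 1
              match b with
              | none => some gap
              | some m => if gap < m then some gap else some m)
            b)
        none with
      | none => -1
      | some m => m) = _
  generalize PySem.List.enumerate arr = l
  have hfold : (l.foldl (fun d p => PySem.Dict.modify d p.2 [] (fun s => s ++ [p.1]))
        PySem.Dict.empty)
      = ((l.map (fun p => (p.2, p.1))).foldl
          (fun d (p : Int × Int) => PySem.Dict.modify d p.1 [] (fun s => s ++ [p.2]))
          PySem.Dict.empty) := by
    rw [List.foldl_map]
  have hgetD : ∀ x, (l.foldl (fun d p => PySem.Dict.modify d p.2 [] (fun s => s ++ [p.1]))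
      PySem.Dict.empty).getD x [] = pvOcc l x := by
    intro x
    rw [hfold, PySem.Dict.getD_foldl_modify_append]
    simp [pvOcc, List.filter_map, List.map_map, Function.comp_def]
  have hkeys : (l.foldl (fun d p => PySem.Dict.modify d p.2 [] (fun s => s ++ [p.1]))
      PySem.Dict.empty).keys = pvKeys l := by
    rw [PySem.Dict.keys_foldl_modify_key l (fun p => p.2) ([] : List Int)
        (fun _ p => fun s => s ++ [p.1]) PySem.Dict.empty,
      PySem.Dict.keys_empty, pvKeys]
    exact PySem.Set.update_empty _
  have hnodup : (l.foldl (fun d p => PySem.Dict.modify d p.2 [] (fun s => s ++ [p.1]))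
      PySem.Dict.empty).keys.Nodup := by
    exact PySem.Dict.nodup_keys_foldl_modify_key l (fun p => p.2) ([] : List Int)
      (fun _ p => fun s => s ++ [p.1]) PySem.Dict.empty
      (by rw [PySem.Dict.keys_empty]; exact List.nodup_nil)
  have hvalues : PySem.Dict.values (l.foldl
        (fun d p => PySem.Dict.modify d p.2 [] (fun s => s ++ [p.1])) PySem.Dict.empty)
      = (pvKeys l).map (fun x => pvOcc l x) := by
    rw [PySem.Dict.values_eq_map_keys _ hnodup [], hkeys]
    exact List.map_congr_left (fun k _ => hgetD k)
  have hinner : ∀ (pos : List Int) (b : Option Int),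
      (pos.zip pos.tail).foldl
        (fun (b : Option Int) q =>
          let gap := q.2 - q.1 - 1
          match b with
          | none => some gap
          | some m => if gap < m then some gap else some m)
        b
      = (pvGaps pos).foldl pvStep b := by
    intro pos b
    rw [pvGaps, List.foldl_map]
    rfl
  rw [hvalues, List.foldl_map]
  simp only [hinner]
  rw [pvAll, List.flatMap_def, List.foldl_flatten, List.foldl_map]

-- ===== VERDICT (by name: the statement is the Claim_ definition above) =====
theorem check_same_cards_spec : Claim_equal_check_same_cards := by
  intro arr _
  show check_same_cards arr = check_same_cards_alt arr
  rw [pvAlt_eq]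
  show (match ((PySem.List.enumerate arr).foldl pvStepA (PySem.Dict.empty, none)).2 with
        | none => (-1 : Int) | some m => m) = _
  rw [(pvMain (PySem.List.enumerate arr)).2]
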